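-- pv_equiv track=rewrite | github.com/artkpv/code-dojo | hackerrank.com/challenges/equal/equal.py | increase
-- ===== SOURCE A (Python) =====
-- def increase(x, A, k):  # increase all with x except k-th
--     assert k > 0, "won't increase the smallest element"
--     B = [A[i] + x if i != k else A[i] for i in range(len(A))]
--     # insert k-th element to maintain order:
--     i, j = k - 1, k
--     while i > 0 and B[i] > B[j]:
--         t = B[i]
--         B[i] = B[j]
--         B[j] = t
--         j = i
--         i -= 1
--     return tuple(B)
-- ===== SOURCE B (Python) =====
-- def increase(x, A, k):  # increase all with x except k-th, keep order by one-shot slicing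
--     assert k > 0, "won't increase the smallest element"
--     v = A[k]
--     C = [a + x for a in A]
--     p = k
--     while p > 1 and C[p - 1] > v:
--         p -= 1
--     return tuple(C[:p] + [v] + C[p:k] + C[k + 1:])
-- ===== Notes on version B (the rewrite author's own statement) =====
-- stated objective: alternative
-- what changed: replaces the adjacent-swap bubbling (repeated triple-assignment swaps mutating B) by a pure index search for the insertion point followed by a one-shot slice assembly C[:p]+[v]+C[p:k]+C[k+1:]
-- outside the precondition, e.g. on increase(1, [5], 1): A returns (6,), B raises IndexError
import Mathlib
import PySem

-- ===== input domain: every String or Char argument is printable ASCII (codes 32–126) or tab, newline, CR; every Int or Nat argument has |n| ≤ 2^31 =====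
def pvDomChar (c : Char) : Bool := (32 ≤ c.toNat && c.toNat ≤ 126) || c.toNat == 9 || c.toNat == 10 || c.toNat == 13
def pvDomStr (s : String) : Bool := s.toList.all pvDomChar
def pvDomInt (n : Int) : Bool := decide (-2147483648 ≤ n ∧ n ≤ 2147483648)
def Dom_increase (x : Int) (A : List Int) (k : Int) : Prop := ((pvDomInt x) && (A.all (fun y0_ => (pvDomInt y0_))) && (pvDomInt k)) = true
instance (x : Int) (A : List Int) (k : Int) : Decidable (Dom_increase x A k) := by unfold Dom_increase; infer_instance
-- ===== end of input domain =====

-- B replaces A's in-place adjacent-swap bubbling by a pure search for the insertion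
-- point followed by a one-shot slice assembly (alternative decomposition, same cost);
-- equivalence of the return values is proved on Pre_ (0 < k < |A|).

-- ===== PORT A =====
-- A's while loop: swap B[i],B[j] while i > 0 and B[i] > B[j]; then j := i, i := i-1.
-- Indices are in range on every input admitted by Pre_, so getD is exact for Python's B[i].
def increaseLoopA (B : List Int) (i j : Int) : List Int :=
  if _h : 0 < i ∧ B.getD i.toNat 0 > B.getD j.toNat 0 then
    increaseLoopA ((B.set i.toNat (B.getD j.toNat 0)).set j.toNat (B.getD i.toNat 0)) (i - 1) i
  else B
termination_by i.toNat
decreasing_by omega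

def increase (x : Int) (A : List Int) (k : Int) : List Int :=
  -- B = [A[i] + x if i != k else A[i] for i in range(len(A))]
  let B := (List.range A.length).map (fun (i : Nat) => if (i : Int) ≠ k then A.getD i 0 + x else A.getD i 0)
  increaseLoopA B (k - 1) k

-- ===== PORT B =====
-- B's search loop: p := k; while p > 1 and C[p-1] > v: p -= 1
def findP (C : List Int) (v : Int) (p : Int) : Int :=
  if _h : 1 < p ∧ C.getD (p - 1).toNat 0 > v then findP C v (p - 1) else p
termination_by p.toNat
decreasing_by omega

def increase_alt (x : Int) (A : List Int) (k : Int) : List Int :=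
  let v := A.getD k.toNat 0
  let C := A.map (fun a => a + x)
  let p := findP C v k
  PySem.List.slice C none (some p) ++ [v] ++ PySem.List.slice C (some p) (some k)
    ++ PySem.List.slice C (some (k + 1)) none

-- ===== PRECONDITION & SPEC =====
-- Pre_ excludes k ≤ 0 (A's assert raises AssertionError) and k ≥ len(A) (A raises
-- IndexError in the loop except in the degenerate case k = 1, len(A) ≤ 1, where A
-- returns but B itself raises IndexError on A[k]).
def Pre_increase (x : Int) (A : List Int) (k : Int) : Prop := 0 < k ∧ k < A.length
instance (x : Int) (A : List Int) (k : Int) : Decidable (Pre_increase x A k) := by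
  unfold Pre_increase; infer_instance
def pvWitness_increase : Int × List Int × Int := (1, [3, 1, 2], 2)

def Spec_increase (x : Int) (A : List Int) (k : Int) (out : List Int) : Prop := out = increase_alt x A k
instance (x : Int) (A : List Int) (k : Int) (out : List Int) : Decidable (Spec_increase x A k out) := by unfold Spec_increase; infer_instance

-- ===== CLAIM (what is proved, stated in full; the proofs are below) =====
def Claim_equal_increase : Prop := ∀ (x : Int) (A : List Int) (k : Int), Dom_increase x A k → Pre_increase x A k → Spec_increase x A k (increase x A k)

-- ===== LEMMAS AND PROOFS =====

-- the shape of A's array when the un-increased value v sits at position i+1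
def st (C : List Int) (v : Int) (kn i : Nat) : List Int :=
  C.take (i + 1) ++ [v] ++ (C.take kn).drop (i + 1) ++ C.drop (kn + 1)

theorem st_getD_left (C : List Int) (v : Int) (kn i : Nat)
    (h : i + 1 ≤ kn) (hlen : kn < C.length) :
    (st C v kn i).getD i 0 = C.getD i 0 := by
  have h1 : i < (C.take (i + 1)).length := by simp; omega
  simp only [st, List.append_assoc, List.getD_eq_getElem?_getD]
  rw [List.getElem?_append_left h1]
  simp

theorem st_getD_right (C : List Int) (v : Int) (kn i : Nat)
    (h : i + 1 ≤ kn) (hlen : kn < C.length) :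
    (st C v kn i).getD (i + 1) 0 = v := by
  have h1 : (C.take (i + 1)).length = i + 1 := by simp; omega
  simp only [st, List.append_assoc, List.getD_eq_getElem?_getD]
  rw [List.getElem?_append_right (by omega), h1]
  simp

theorem set_append_len {α : Type} (l r : List α) (a v : α) :
    (l ++ a :: r).set l.length v = l ++ v :: r := by
  induction l with
  | nil => simp
  | cons b t ih => simp [ih]

theorem set_append_len_succ {α : Type} (l r : List α) (a b v : α) :
    (l ++ a :: b :: r).set (l.length + 1) v = l ++ a :: v :: r := by
  have := set_append_len (l ++ [a]) r b v
  simpa using this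

theorem swap_generic {α : Type} (l r : List α) (a b : α) (i : Nat) (hi : i = l.length) :
    ((l ++ a :: b :: r).set i b).set (i + 1) a = l ++ b :: a :: r := by
  subst hi
  rw [set_append_len]
  exact set_append_len_succ l r b b a

theorem st_swap (C : List Int) (v : Int) (kn i : Nat)
    (hi : 1 ≤ i) (h : i + 1 ≤ kn) (hlen : kn < C.length) :
    ((st C v kn i).set i v).set (i + 1) (C.getD i 0) = st C v kn (i - 1) := by
  have hiC : i < C.length := by omega
  have h1 : st C v kn i = C.take i ++ C[i] :: v :: ((C.take kn).drop (i + 1) ++ C.drop (kn + 1)) := by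
    unfold st
    rw [List.take_add_one, List.getElem?_eq_getElem hiC]
    simp only [Option.toList_some, List.append_assoc, List.cons_append, List.nil_append]
  have h2 : st C v kn (i - 1) = C.take i ++ v :: C[i] :: ((C.take kn).drop (i + 1) ++ C.drop (kn + 1)) := by
    unfold st
    rw [show i - 1 + 1 = i by omega]
    have hdrop : (C.take kn).drop i = C[i] :: (C.take kn).drop (i + 1) := by
      rw [List.drop_eq_getElem_cons (by simp; omega)]
      congr 1
      exact List.getElem_take
    rw [hdrop]; simp
  rw [h1, h2]
  rw [show C.getD i 0 = C[i] by simp [List.getD_eq_getElem?_getD, List.getElem?_eq_getElem hiC]]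
  exact swap_generic _ _ _ _ i (by simp [Nat.min_eq_left (le_of_lt hiC)])

theorem findP_bounds (C : List Int) (v : Int) (p : Int) (hp : 1 ≤ p) :
    1 ≤ findP C v p ∧ findP C v p ≤ p := by
  unfold findP
  split
  · rename_i h
    have := findP_bounds C v (p - 1) (by omega)
    omega
  · omega
termination_by p.toNat
decreasing_by omega

theorem loopA_eq (C : List Int) (v : Int) (kn : Nat) (hlen : kn < C.length) :
    ∀ i : Nat, i + 1 ≤ kn →
      increaseLoopA (st C v kn i) (i : Int) ((i : Int) + 1)
        = st C v kn ((findP C v ((i : Int) + 1)).toNat - 1) := by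
  intro i
  induction i with
  | zero =>
    intro _
    rw [increaseLoopA, findP]
    norm_num
  | succ m ih =>
    intro h
    have hgl := st_getD_left C v kn (m + 1) h hlen
    have hgr := st_getD_right C v kn (m + 1) h hlen
    rw [increaseLoopA]
    by_cases hc : C.getD (m + 1) 0 > v
    · have hcond : (0 : Int) < (m + 1 : Nat) ∧
          (st C v kn (m + 1)).getD ((m + 1 : Nat) : Int).toNat 0 >
            (st C v kn (m + 1)).getD (((m + 1 : Nat) : Int) + 1).toNat 0 := by
        constructor
        · positivity
        · have e1 : (((m + 1 : Nat) : Int)).toNat = m + 1 := by omega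
          have e2 : (((m + 1 : Nat) : Int) + 1).toNat = m + 2 := by omega
          rw [e1, e2]
          rw [show m + 2 = (m + 1) + 1 from rfl]
          rw [hgl, hgr]; exact hc
      rw [dif_pos hcond]
      have e1 : (((m + 1 : Nat) : Int)).toNat = m + 1 := by omega
      have e2 : (((m + 1 : Nat) : Int) + 1).toNat = m + 2 := by omega
      rw [e1, e2, show m + 2 = (m + 1) + 1 from rfl, hgl, hgr]
      have hswap := st_swap C v kn (m + 1) (by omega) h hlen
      rw [hswap]
      have em : ((m + 1 : Nat) : Int) - 1 = (m : Int) := by push_cast; ring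
      rw [show (m + 1 : Nat) - 1 = m from rfl, em]
      have ihr := ih (by omega)
      have efp : findP C v (((m + 1 : Nat) : Int) + 1) = findP C v ((m : Int) + 1) := by
        rw [findP]
        have : (1 : Int) < ((m + 1 : Nat) : Int) + 1 ∧
            C.getD (((m + 1 : Nat) : Int) + 1 - 1).toNat 0 > v := by
          constructor
          · push_cast; omega
          · have : (((m + 1 : Nat) : Int) + 1 - 1).toNat = m + 1 := by omega
            rw [this]; exact hc
        rw [dif_pos this]
        congr 1
        push_cast; ring
      rw [efp]; exact ihr
    · have hcond : ¬ ((0 : Int) < (m + 1 : Nat) ∧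
          (st C v kn (m + 1)).getD ((m + 1 : Nat) : Int).toNat 0 >
            (st C v kn (m + 1)).getD (((m + 1 : Nat) : Int) + 1).toNat 0) := by
        intro ⟨_, hgt⟩
        have e1 : (((m + 1 : Nat) : Int)).toNat = m + 1 := by omega
        have e2 : (((m + 1 : Nat) : Int) + 1).toNat = m + 2 := by omega
        rw [e1, e2, show m + 2 = (m + 1) + 1 from rfl, hgl, hgr] at hgt
        exact hc hgt
      rw [dif_neg hcond]
      have efp : findP C v (((m + 1 : Nat) : Int) + 1) = ((m + 1 : Nat) : Int) + 1 := by
        rw [findP]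
        have : ¬ ((1 : Int) < ((m + 1 : Nat) : Int) + 1 ∧
            C.getD (((m + 1 : Nat) : Int) + 1 - 1).toNat 0 > v) := by
          intro ⟨_, hgt⟩
          have : (((m + 1 : Nat) : Int) + 1 - 1).toNat = m + 1 := by omega
          rw [this] at hgt
          exact hc hgt
        rw [dif_neg this]
      rw [efp, show ((((m + 1 : Nat) : Int)) + 1).toNat - 1 = m + 1 by omega]

-- the comprehension builds C with position k left un-increased
theorem comprehension_eq (x : Int) (A : List Int) (k : Int)
    (hk0 : 0 < k) (hklen : k < A.length) :
    (List.range A.length).map (fun (i : Nat) => if (i : Int) ≠ k then A.getD i 0 + x else A.getD i 0)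
      = (A.map (fun a => a + x)).take k.toNat ++ [A.getD k.toNat 0]
        ++ (A.map (fun a => a + x)).drop (k.toNat + 1) := by
  have hkn : k.toNat < A.length := by omega
  apply List.ext_getElem?
  intro i
  rcases Nat.lt_or_ge i A.length with hi | hi
  · rw [List.getElem?_map, List.getElem?_range (by omega), Option.map_some]
    rcases Nat.lt_trichotomy i k.toNat with hlt | heq | hgt
    · rw [List.append_assoc, List.getElem?_append_left (by simp; omega)]
      rw [List.getElem?_take_of_lt hlt, List.getElem?_map, List.getElem?_eq_getElem hi]
      simp [List.getD_eq_getElem?_getD, List.getElem?_eq_getElem hi]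
      omega
    · subst heq
      rw [List.append_assoc, List.getElem?_append_right (by simp)]
      simp [Nat.min_eq_left (le_of_lt hkn), List.getD_eq_getElem?_getD, List.getElem?_eq_getElem hkn]
      omega
    · rw [List.append_assoc, List.getElem?_append_right (by simp; omega)]
      have hmin : ((A.map (fun a => a + x)).take k.toNat).length = k.toNat := by
        simp [Nat.min_eq_left (le_of_lt hkn)]
      rw [hmin]
      rw [List.getElem?_append_right (by simp; omega)]
      simp only [List.length_singleton, List.getElem?_drop, List.getElem?_map]
      rw [show k.toNat + 1 + (i - k.toNat - 1) = i by omega,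
        List.getElem?_eq_getElem hi, if_pos (by omega : (i : Int) ≠ k)]
      simp [List.getD_eq_getElem?_getD, List.getElem?_eq_getElem hi]
  · rw [List.getElem?_eq_none (by simp; omega), List.getElem?_eq_none (by simp; omega)]

-- ===== VERDICT (by name: the statement is the Claim_ definition above) =====
theorem increase_spec : Claim_equal_increase := by
  intro x A k _hdom hpre
  obtain ⟨hk0, hklen⟩ := hpre
  have hknC : k.toNat < (A.map (fun a => a + x)).length := by simp; omega
  have hloop := loopA_eq (A.map (fun a => a + x)) (A.getD k.toNat 0) k.toNat hknC
    (k.toNat - 1) (by omega)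
  rw [show ((k.toNat - 1 : Nat) : Int) = k - 1 by omega, show k - 1 + 1 = k by ring] at hloop
  have hinit : (List.range A.length).map
      (fun (i : Nat) => if (i : Int) ≠ k then A.getD i 0 + x else A.getD i 0)
        = st (A.map (fun a => a + x)) (A.getD k.toNat 0) k.toNat (k.toNat - 1) := by
    rw [comprehension_eq x A k hk0 hklen]
    unfold st
    rw [show k.toNat - 1 + 1 = k.toNat by omega]
    simp
  obtain ⟨hp1, hpk⟩ := findP_bounds (A.map (fun a => a + x)) (A.getD k.toNat 0) k (by omega)
  unfold Spec_increase increase increase_alt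
  simp only []
  rw [hinit, hloop]
  unfold st
  rw [show (findP (A.map (fun a => a + x)) (A.getD k.toNat 0) k).toNat - 1 + 1
      = (findP (A.map (fun a => a + x)) (A.getD k.toNat 0) k).toNat by omega]
  rw [PySem.List.slice_to _ (by omega), PySem.List.slice_from _ (by omega)]
  rw [PySem.List.slice_toNat _ (by omega) (by omega)]
  rw [show (k + 1).toNat = k.toNat + 1 by omega]
  congr 1
  congr 1
  rw [List.drop_take]
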